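-- pv_equiv track=rewrite | github.com/IRakow/ai-ops-saas | app/services/ai_ops_knowledge_service.py | _rank_by_relevance
-- ===== SOURCE A (Python) =====
-- def _rank_by_relevance(patterns, keywords):
--     """Rank patterns by number of keyword matches in bug_summary + root_cause."""
--
--     def score(pattern):
--         text = (
--             (pattern.get("bug_summary") or "") + " " +
--             (pattern.get("root_cause") or "")
--         ).lower()
--         return sum(1 for kw in keywords if kw in text)
--
--     return sorted(patterns, key=score, reverse=True)
-- ===== SOURCE B (Python) =====
-- def _rank_by_relevance(patterns, keywords):
--     """Stable bucket (counting) sort by keyword-match score instead of a comparison sort."""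
--
--     def match_count(p):
--         text = (
--             (p.get("bug_summary") or "") + " " +
--             (p.get("root_cause") or "")
--         ).lower()
--         return len([kw for kw in keywords if kw in text])
--
--     buckets = [[] for _ in range(len(keywords) + 1)]
--     for p in patterns:
--         buckets[match_count(p)].append(p)
--     result = []
--     for i in range(len(keywords), -1, -1):
--         result += buckets[i]
--     return result
-- ===== Notes on version B (the rewrite author's own statement) =====
-- stated objective: alternative
-- what changed: Replaces sorted(patterns, key=score, reverse=True) with a stable bucket (counting) sort: each pattern's keyword-match count (computed as a filtered-list length instead of a generator sum) picks one of len(keywords)+1 buckets in original order, and the result is emitted by an index loop counting down from len(keywords) to 0.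
import Mathlib
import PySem

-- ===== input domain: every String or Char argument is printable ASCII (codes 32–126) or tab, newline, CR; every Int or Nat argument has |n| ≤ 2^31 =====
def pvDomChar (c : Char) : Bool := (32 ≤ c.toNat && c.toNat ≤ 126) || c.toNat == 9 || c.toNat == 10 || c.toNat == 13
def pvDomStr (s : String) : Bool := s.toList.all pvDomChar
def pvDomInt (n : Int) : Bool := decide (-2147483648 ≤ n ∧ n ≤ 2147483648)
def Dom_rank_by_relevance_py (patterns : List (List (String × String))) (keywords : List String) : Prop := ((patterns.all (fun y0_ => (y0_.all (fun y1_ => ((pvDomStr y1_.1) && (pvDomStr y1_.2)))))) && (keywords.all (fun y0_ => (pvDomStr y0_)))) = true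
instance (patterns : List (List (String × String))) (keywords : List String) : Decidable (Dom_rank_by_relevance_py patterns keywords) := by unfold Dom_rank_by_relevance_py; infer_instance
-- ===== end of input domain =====

-- B replaces A's stable comparison sort with a bucket (counting) sort over scores 0..len(keywords), emitted by a countdown index loop.


-- ===== PORT A =====
-- text = ((pattern.get("bug_summary") or "") + " " + (pattern.get("root_cause") or "")).lower()
-- (`s or ""` on a string value or None is `Option.getD ""`: "" is falsy and maps to itself)
def pvScoreText (pattern : List (String × String)) : String :=
  PySem.Str.lower ((((PySem.Dict.mk pattern).get? "bug_summary").getD "") ++ " " ++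
                   (((PySem.Dict.mk pattern).get? "root_cause").getD ""))

-- sum(1 for kw in keywords if kw in text), a running count
def pvScore (keywords : List String) (pattern : List (String × String)) : Nat :=
  keywords.foldl (fun acc kw => if PySem.Str.isIn kw (pvScoreText pattern) then acc + 1 else acc) 0

-- sorted(patterns, key=score, reverse=True)
def rank_by_relevance_py (patterns : List (List (String × String))) (keywords : List String) : List (List (String × String)) :=
  PySem.List.sorted patterns (pvScore keywords) true

-- ===== PORT B =====
-- text = ((p.get("bug_summary") or "") + " " + (p.get("root_cause") or "")).lower()
def pvAltText (p : List (String × String)) : String :=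
  PySem.Str.lower ((((PySem.Dict.mk p).get? "bug_summary").getD "") ++ " " ++
                   (((PySem.Dict.mk p).get? "root_cause").getD ""))

-- len([kw for kw in keywords if kw in text])
def pvMatchCount (keywords : List String) (p : List (String × String)) : Nat :=
  (keywords.filter (fun kw => PySem.Str.isIn kw (pvAltText p))).length

-- buckets = [[] for _ in range(len(keywords)+1)]; for p in patterns: buckets[match_count(p)].append(p)
-- result = []; for i in range(len(keywords), -1, -1): result += buckets[i]
-- (buckets[i]: the index i is always in range, so the `.getD []` default is never taken)
def rank_by_relevance_py_alt (patterns : List (List (String × String))) (keywords : List String) : List (List (String × String)) :=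
  let buckets := patterns.foldl
    (fun bs p => bs.modify (pvMatchCount keywords p) (· ++ [p]))
    (List.replicate (keywords.length + 1) ([] : List (List (String × String))))
  (PySem.List.pyRange (keywords.length : Int) (-1) (-1)).foldl
    (fun result i => result ++ (PySem.List.pyGet? buckets i).getD []) []

-- ===== PRECONDITION & SPEC =====
def Spec_rank_by_relevance_py (patterns : List (List (String × String))) (keywords : List String) (out : List (List (String × String))) : Prop := out = rank_by_relevance_py_alt patterns keywords
instance (patterns : List (List (String × String))) (keywords : List String) (out : List (List (String × String))) : Decidable (Spec_rank_by_relevance_py patterns keywords out) := by unfold Spec_rank_by_relevance_py; infer_instance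

-- ===== CLAIM =====
def Claim_equal_rank_by_relevance_py : Prop := ∀ (patterns : List (List (String × String))) (keywords : List String), Dom_rank_by_relevance_py patterns keywords → Spec_rank_by_relevance_py patterns keywords (rank_by_relevance_py patterns keywords)

-- ===== LEMMAS AND PROOFS =====

-- A's running count equals B's filter length (same predicate, same keywords)
theorem foldl_count_eq_filter_length {α : Type} (P : α → Bool) :
    ∀ (l : List α) (a : Nat),
    l.foldl (fun acc kw => if P kw then acc + 1 else acc) a = a + (l.filter P).length := by
  intro l
  induction l with
  | nil => intro a; simp
  | cons k t ih =>
    intro a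
    by_cases h : P k = true
    · simp [h, ih]; omega
    · simp [h, ih]

theorem pvMatchCount_eq_pvScore (keywords : List String) (p : List (String × String)) :
    pvMatchCount keywords p = pvScore keywords p := by
  unfold pvMatchCount pvScore pvAltText pvScoreText
  rw [foldl_count_eq_filter_length]
  simp

-- the score is at most the number of keywords
theorem pvScore_le (keywords : List String) (p : List (String × String)) :
    pvScore keywords p ≤ keywords.length := by
  unfold pvScore
  rw [foldl_count_eq_filter_length]
  simpa using List.length_filter_le _ _

-- inserting before a suffix whose every element satisfies `before`
theorem insertBy_append_all_before {α : Type} (before : α → α → Bool) (x : α)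
    (u v : List α) (h : ∀ y ∈ v, before x y = true) :
    PySem.List.insertBy before x (u ++ v) = PySem.List.insertBy before x u ++ v := by
  induction u with
  | nil =>
    cases v with
    | nil => simp [PySem.List.insertBy]
    | cons z vs => simp [PySem.List.insertBy, h z (by simp)]
  | cons a u' ih =>
    by_cases ha : before x a = true
    · simp [PySem.List.insertBy, ha]
    · simp only [Bool.not_eq_true] at ha
      simp [PySem.List.insertBy, ha, ih]

-- one insertion into the flattened descending bucket list = appending to its bucket
theorem insert_buckets {α : Type} (key : α → Nat) (x : α) :
    ∀ (o : Nat) (bs : List (List α)),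
    (∀ i (h : i < bs.length), ∀ p ∈ bs[i], key p = o + i) →
    o ≤ key x → key x < o + bs.length →
    PySem.List.insertBy (fun a b => decide (key b < key a)) x bs.reverse.flatten
      = (bs.modify (key x - o) (· ++ [x])).reverse.flatten := by
  intro o bs
  induction bs generalizing o with
  | nil => intro _ _ hlt; simp at hlt; omega
  | cons b rest ih =>
    intro hinv hle hlt
    have hb : ∀ y ∈ b, key y = o := by
      intro y hy
      have := hinv 0 (by simp) y (by simpa using hy)
      simpa using this
    have hrest : ∀ i (h : i < rest.length), ∀ p ∈ rest[i], key p = (o + 1) + i := by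
      intro i h p hp
      have := hinv (i + 1) (by simpa using Nat.succ_lt_succ h) p (by simpa using hp)
      omega
    have hflat : ∀ y ∈ rest.reverse.flatten, o + 1 ≤ key y := by
      intro y hy
      rw [List.mem_flatten] at hy
      obtain ⟨l, hl, hyl⟩ := hy
      rw [List.mem_reverse] at hl
      obtain ⟨i, hi, rfl⟩ := List.mem_iff_getElem.mp hl
      have := hrest i hi y hyl
      omega
    have hflatten : (b :: rest).reverse.flatten = rest.reverse.flatten ++ b := by
      simp
    rcases Nat.eq_or_lt_of_le hle with heq | hgt
    · -- key x = o : x goes at the very end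
      have hall : ∀ y ∈ rest.reverse.flatten ++ b, (fun a b => decide (key b < key a)) x y = false := by
        intro y hy
        rcases List.mem_append.mp hy with hy | hy
        · have := hflat y hy; simp; omega
        · have := hb y hy; simp; omega
      rw [hflatten, PySem.List.insertBy_of_forall_not_before _ _ _ hall]
      have : key x - o = 0 := by omega
      rw [this]
      simp [List.modify]
    · -- key x > o : x is inserted somewhere in the higher buckets
      have hvb : ∀ y ∈ b, (fun a b => decide (key b < key a)) x y = true := by
        intro y hy
        have := hb y hy; simp; omega
      rw [hflatten, insertBy_append_all_before _ _ _ _ hvb]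
      have hlt' : key x < (o + 1) + rest.length := by simp at hlt; omega
      rw [ih (o + 1) hrest (by omega) hlt']
      have hidx : key x - o = (key x - (o + 1)) + 1 := by omega
      rw [hidx]
      simp [List.modify]

-- the whole insertion-sort fold equals the whole bucketing fold
theorem fold_buckets {α : Type} (key : α → Nat) :
    ∀ (ps : List α) (bs : List (List α)),
    (∀ i (h : i < bs.length), ∀ p ∈ bs[i], key p = i) →
    (∀ p ∈ ps, key p < bs.length) →
    ps.foldl (fun acc x => PySem.List.insertBy (fun a b => decide (key b < key a)) x acc) bs.reverse.flatten
      = (ps.foldl (fun bs x => bs.modify (key x) (· ++ [x])) bs).reverse.flatten := by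
  intro ps
  induction ps with
  | nil => intro bs _ _; simp
  | cons p t ih =>
    intro bs hinv hlt
    simp only [List.foldl_cons]
    rw [insert_buckets key p 0 bs (by simpa using hinv) (Nat.zero_le _)
        (by simpa using hlt p (by simp))]
    simp only [Nat.sub_zero]
    apply ih
    · intro i hi q hq
      rw [List.getElem_modify] at hq
      by_cases hik : key p = i
      · rw [if_pos hik] at hq
        rcases List.mem_append.mp hq with hq | hq
        · exact hinv i (by simpa using hi) q hq
        · simp at hq; subst hq; omega
      · rw [if_neg hik] at hq
        exact hinv i (by simpa using hi) q hq
    · intro q hq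
      simp only [List.length_modify]
      exact hlt q (by simp [hq])

-- bucketing preserves the number of buckets
theorem foldl_modify_length {α : Type} (key : α → Nat) (ps : List α) :
    ∀ (bs : List (List α)),
    (ps.foldl (fun bs x => bs.modify (key x) (· ++ [x])) bs).length = bs.length := by
  induction ps with
  | nil => intro bs; rfl
  | cons p t ih => intro bs; simp [ih]

-- B's countdown emission loop flattens the reversed bucket list
theorem countdown_fold_eq_reverse_flatten {α : Type} (bs : List (List α)) :
    ∀ (m : Nat) (acc : List α), m ≤ bs.length →
    (PySem.List.pyRange ((m : Int) - 1) (-1) (-1)).foldl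
      (fun r i => r ++ (PySem.List.pyGet? bs i).getD []) acc
      = acc ++ ((bs.take m).reverse.flatten) := by
  intro m
  induction m with
  | zero =>
    intro acc _
    rw [PySem.List.pyRange_neg_one_eq_nil (by norm_num)]
    simp
  | succ n ih =>
    intro acc hm
    have hn : n < bs.length := by omega
    rw [show ((n + 1 : Nat) : Int) - 1 = (n : Int) by push_cast; ring]
    rw [PySem.List.pyRange_neg_one_cons (by omega)]
    simp only [List.foldl_cons]
    rw [show (n : Int) - 1 = ((n : Nat) : Int) - 1 by norm_num]
    rw [ih _ (by omega)]
    rw [PySem.List.pyGet?_natCast]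
    rw [List.getElem?_eq_getElem hn]
    have : bs.take (n + 1) = bs.take n ++ [bs[n]] := by
      rw [List.take_add_one, List.getElem?_eq_getElem hn]; rfl
    rw [this, List.reverse_append, List.flatten_append]
    simp

-- ===== VERDICT =====
theorem rank_by_relevance_py_spec : Claim_equal_rank_by_relevance_py := by
  intro patterns keywords _
  unfold Spec_rank_by_relevance_py rank_by_relevance_py rank_by_relevance_py_alt
  simp only [pvMatchCount_eq_pvScore]
  have h := fold_buckets (pvScore keywords) patterns
    (List.replicate (keywords.length + 1) ([] : List (List (String × String))))
    (by intro i hi p hp; simp at hp)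
    (by intro p _; simp; exact pvScore_le keywords p)
  set bkts := patterns.foldl (fun bs p => bs.modify (pvScore keywords p) (· ++ [p]))
    (List.replicate (keywords.length + 1) ([] : List (List (String × String)))) with hb
  have hlen : bkts.length = keywords.length + 1 := by
    rw [hb, foldl_modify_length]; simp
  rw [show ((keywords.length : Int)) = ((bkts.length : Nat) : Int) - 1 by rw [hlen]; push_cast; ring]
  rw [countdown_fold_eq_reverse_flatten bkts bkts.length [] le_rfl]
  rw [List.take_length, List.nil_append]
  rw [PySem.List.sorted_rev_eq_foldl_insertBy]
  simpa using h
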